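-- pv_equiv track=rewrite | github.com/basilwong/coding-problems | python/project-euler+/122-efficient-exponentiation/find_efficient_expo.py | get_spec_method
-- ===== SOURCE A (Python) =====
-- def get_spec_method(k):
--     """
--     Recursive method for a simple, understandable way of finding the addition chain for input k
--     :param k: result of addition chain
--     :return: steps of addition chain
--     """
--     ret_list = list()
--     b = 1
--     while b <= k:
--         a = b
--         b = a * 2
--         if b <= k:
--             ret_list.append([a, a, b])
--
--     remainder = k - a
--     if remainder == 0:
--         return ret_list
--     elif remainder < 3:
--         ret_list.append([a, remainder, k])
--         return ret_list
--     else: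
--         for x in get_spec_method(remainder):
--             ret_list.append(x)
--         ret_list.append([a, remainder, k])
--         return ret_list
-- ===== SOURCE B (Python) =====
-- def get_spec_method(k):
--     chain = []
--     stack = []
--     current = k
--     while True:
--         e = current.bit_length() - 1
--         a = 1 << e
--         chain.extend([1 << i, 1 << i, 1 << (i + 1)] for i in range(e))
--         r = current - a
--         if r == 0:
--             break
--         stack.append([a, r, current])
--         if r < 3:
--             break
--         current = r
--     chain.extend(reversed(stack))
--     return chain
-- ===== Notes on version B (the rewrite author's own statement) =====
-- stated objective: alternative
-- what changed: A's recursion with a hand-rolled doubling while-loop is replaced by an iterative loop over the remainder chain that computes each doubling block in closed form from the bit length (powers 2^i for i < log2) and stacks the final triplets, reversed once at the end.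
import Mathlib
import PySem

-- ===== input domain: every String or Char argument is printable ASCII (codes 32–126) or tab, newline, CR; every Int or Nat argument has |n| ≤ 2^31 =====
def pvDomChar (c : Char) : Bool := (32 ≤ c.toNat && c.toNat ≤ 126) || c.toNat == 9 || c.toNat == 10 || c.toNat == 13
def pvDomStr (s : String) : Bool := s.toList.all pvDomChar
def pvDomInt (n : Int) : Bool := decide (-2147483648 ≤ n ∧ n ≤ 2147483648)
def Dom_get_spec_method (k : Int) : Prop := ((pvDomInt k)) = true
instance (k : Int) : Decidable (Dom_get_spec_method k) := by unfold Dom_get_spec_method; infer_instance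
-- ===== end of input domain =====

-- B replaces A's recursion on the remainder by an iterative loop that computes each block of
-- doubling steps in closed form from the bit length (2^i for i < log2) and collects the final
-- triplets on a stack reversed at the end (objective: alternative decomposition, same cost).


-- ===== PORT A =====
-- A's doubling while-loop, entered right after the assignment `a = b`: computes b = a*2,
-- appends [a,a,b] when b <= k, loops while b <= k.  `fuel` is a totality device only:
-- every call below supplies enough of it (a doubles each step), so it never changes the value.
def dblAux (fuel : Nat) (k a : Int) (acc : List (List Int)) : Int × List (List Int) :=
  match fuel with
  | 0 => (a, acc)
  | f + 1 =>
    let b := a * 2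
    let acc' := if b ≤ k then acc ++ [[a, a, b]] else acc
    if b ≤ k then dblAux f k b acc' else (a, acc')

-- A's body; outer fuel covers the recursion on `remainder` (it strictly decreases).
-- For k ≤ 0 the Python loop body never runs and `remainder = k - a` raises
-- UnboundLocalError; Pre_ excludes those k, and [] is only a placeholder there.
def specGo (fuel : Nat) (k : Int) : List (List Int) :=
  match fuel with
  | 0 => []
  | f + 1 =>
    if 1 ≤ k then
      let p := dblAux k.toNat k 1 []
      let a := p.1
      let remainder := k - a
      if remainder = 0 then p.2
      else if remainder < 3 then p.2 ++ [[a, remainder, k]]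
      else p.2 ++ specGo f remainder ++ [[a, remainder, k]]
    else []

def get_spec_method (k : Int) : List (List Int) := specGo (k.toNat + 1) k

-- ===== PORT B =====
-- B's `while True` loop; state = (current, chain, stack); returns the pair (chain, stack)
-- at the loop's break.  Python's `current.bit_length() - 1` for current ≠ 0 is exactly
-- Nat.log2 current.natAbs (bit_length is taken of the absolute value; for current = 0
-- Python raises on `1 << -1`, and the port's value there is irrelevant); `1 << i` is 2^i; the generator over range(e) is the map below.
-- `current` strictly decreases, so the supplied fuel always outlasts the loop.
def altLoop (fuel : Nat) (current : Int) (chain stack : List (List Int)) :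
    List (List Int) × List (List Int) :=
  match fuel with
  | 0 => (chain, stack)
  | f + 1 =>
    let e := Nat.log2 current.natAbs
    let a : Int := 2 ^ e
    let chain' := chain ++ (List.range e).map (fun i => [(2:Int) ^ i, 2 ^ i, 2 ^ (i + 1)])
    let r := current - a
    if r = 0 then (chain', stack)
    else if r < 3 then (chain', stack ++ [[a, r, current]])
    else altLoop f r chain' (stack ++ [[a, r, current]])

def get_spec_method_alt (k : Int) : List (List Int) :=
  let p := altLoop (k.toNat + 1) k [] []
  p.1 ++ p.2.reverse

-- ===== PRECONDITION & SPEC =====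
-- Pre_ excludes exactly the nonpositive k, on which A raises UnboundLocalError (`a` never assigned).
def Pre_get_spec_method (k : Int) : Prop := 1 ≤ k
instance (k : Int) : Decidable (Pre_get_spec_method k) := by unfold Pre_get_spec_method; infer_instance
def pvWitness_get_spec_method : Int := (7)

def Spec_get_spec_method (k : Int) (out : List (List Int)) : Prop := out = get_spec_method_alt k
instance (k : Int) (out : List (List Int)) : Decidable (Spec_get_spec_method k out) := by unfold Spec_get_spec_method; infer_instance

-- ===== CLAIM (what is proved, stated in full; the proofs are below) =====
def Claim_equal_get_spec_method : Prop := ∀ (k : Int), Dom_get_spec_method k → Pre_get_spec_method k → Spec_get_spec_method k (get_spec_method k)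

-- ===== LEMMAS AND PROOFS =====

-- A's hand-rolled doubling loop computes B's closed form: starting from a = 2^i it ends at
-- a = 2^(log2 k) and appends exactly the blocks for exponents i, i+1, …, log2 k - 1.
theorem dblAux_closed (k : Int) (hk : 1 ≤ k) :
    ∀ (d i f : Nat) (acc : List (List Int)), i + d = Nat.log2 k.toNat → d ≤ f →
      dblAux f k (2 ^ i) acc
        = ((2:Int) ^ Nat.log2 k.toNat,
           acc ++ (List.range' i d).map (fun j => [(2:Int) ^ j, 2 ^ j, 2 ^ (j + 1)])) := by
  have hn : k.toNat ≠ 0 := by omega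
  have hub : (k:Int) < 2 ^ (Nat.log2 k.toNat + 1) := by
    have h := Nat.lt_log2_self (n := k.toNat)
    have : (k.toNat : Int) < ((2 ^ (Nat.log2 k.toNat + 1) : Nat) : Int) := by exact_mod_cast h
    push_cast at this
    omega
  have hlb : ∀ j : Nat, j ≤ Nat.log2 k.toNat → (2:Int) ^ j ≤ k := by
    intro j hj
    have h1 : 2 ^ j ≤ 2 ^ Nat.log2 k.toNat := Nat.pow_le_pow_right (by norm_num) hj
    have h2 : 2 ^ Nat.log2 k.toNat ≤ k.toNat := Nat.log2_self_le hn
    have : ((2 ^ j : Nat) : Int) ≤ (k.toNat : Int) := by exact_mod_cast le_trans h1 h2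
    push_cast at this
    omega
  intro d
  induction d with
  | zero =>
    intro i f acc hi _
    obtain rfl : i = Nat.log2 k.toNat := by omega
    have hb : ¬ (2:Int) ^ Nat.log2 k.toNat * 2 ≤ k := by
      have h : (2:Int) ^ Nat.log2 k.toNat * 2 = 2 ^ (Nat.log2 k.toNat + 1) := by ring
      rw [h]; omega
    cases f with
    | zero => simp [dblAux]
    | succ f => simp [dblAux, hb]
  | succ d ih =>
    intro i f acc hi hf
    have hb : (2:Int) ^ i * 2 ≤ k := by
      have h : (2:Int) ^ i * 2 = 2 ^ (i + 1) := by ring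
      rw [h]
      exact hlb (i + 1) (by omega)
    cases f with
    | zero => omega
    | succ f =>
      rw [dblAux]
      simp only [hb, if_pos]
      have h2 : (2:Int) ^ i * 2 = 2 ^ (i + 1) := by ring
      rw [h2, ih (i + 1) f _ (by omega) (by omega), List.range'_succ]
      simp [List.append_assoc]

-- B's loop accumulates exactly A's recursive result around it.
theorem altLoop_eq : ∀ (f : Nat) (c : Int), 1 ≤ c →
    ∀ chain stack,
      (altLoop f c chain stack).1 ++ (altLoop f c chain stack).2.reverse
        = chain ++ specGo f c ++ stack.reverse := by
  intro f
  induction f with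
  | zero => intro c _ chain stack; simp [altLoop, specGo]
  | succ f ih =>
    intro c hc chain stack
    have hna : c.natAbs = c.toNat := by omega
    have hfuel : Nat.log2 c.toNat ≤ c.toNat := by
      have h1 : Nat.log2 c.toNat < 2 ^ Nat.log2 c.toNat := Nat.lt_two_pow_self
      have h2 : 2 ^ Nat.log2 c.toNat ≤ c.toNat := Nat.log2_self_le (by omega)
      omega
    have hcl := dblAux_closed c hc (Nat.log2 c.toNat) 0 c.toNat [] (by omega) hfuel
    rw [altLoop, specGo, if_pos hc, hna]
    simp only [pow_zero] at hcl
    rw [hcl]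
    simp only [List.nil_append, List.range_eq_range']
    by_cases h0 : c - (2:Int) ^ Nat.log2 c.toNat = 0
    · simp [h0]
    · by_cases h3 : c - (2:Int) ^ Nat.log2 c.toNat < 3
      · simp [h0, h3, List.append_assoc]
      · simp only [h0, h3, if_false]
        rw [ih (c - 2 ^ Nat.log2 c.toNat) (by omega)]
        simp [List.append_assoc]

-- ===== VERDICT (by name: the statement is the Claim_ definition above) =====
theorem get_spec_method_spec : Claim_equal_get_spec_method := by
  intro k _ hk
  unfold Spec_get_spec_method get_spec_method_alt get_spec_method
  rw [altLoop_eq (k.toNat + 1) k hk [] []]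
  simp
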